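-- pv_equiv track=rewrite | github.com/pithecuse527/Cracking-Coding-Interview | etc/bowling.py | solution
-- ===== SOURCE A (Python) =====
-- from collections import Counter
--
-- def solution(test_lst, n):
--     answer = 0
--     test_lst.sort()
--     counts = Counter(test_lst)
--
--     for i in counts:
--         n -= counts[i]
--         answer += n * counts[i]
--     return answer
-- ===== SOURCE B (Python) =====
-- def solution(test_lst, n):
--     counts = {}
--     for x in test_lst:
--         counts[x] = counts.get(x, 0) + 1
--     total = len(test_lst)
--     sq = sum(c * c for c in counts.values())
--     return n * total - (total * total + sq) // 2
-- ===== Notes on version B (the rewrite author's own statement) =====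
-- stated objective: faster
-- what changed: Replaces the sort + iteration over sorted distinct values by a closed form n*T - (T^2 + sum of squared counts)/2 computed from a single counting pass (no sort).
import Mathlib
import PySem

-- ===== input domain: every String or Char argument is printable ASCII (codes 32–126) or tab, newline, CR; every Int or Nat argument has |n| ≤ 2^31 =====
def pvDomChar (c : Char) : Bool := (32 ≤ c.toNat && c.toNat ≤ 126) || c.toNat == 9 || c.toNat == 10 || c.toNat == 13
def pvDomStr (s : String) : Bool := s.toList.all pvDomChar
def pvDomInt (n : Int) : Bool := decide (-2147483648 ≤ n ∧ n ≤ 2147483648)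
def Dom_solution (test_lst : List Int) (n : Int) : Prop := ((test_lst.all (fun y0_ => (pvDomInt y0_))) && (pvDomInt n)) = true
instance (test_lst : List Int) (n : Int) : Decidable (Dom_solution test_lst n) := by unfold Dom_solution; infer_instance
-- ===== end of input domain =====

-- B replaces A's sort + loop over sorted distinct values by the closed form
-- n*T - (T^2 + sum of squared counts)/2 from one counting pass (A also sorts
-- test_lst in place; B does not mutate it — the equivalence is about the return value).


-- ===== PORT A =====
-- test_lst.sort(); counts = Counter(test_lst); for i in counts: n -= counts[i]; answer += n * counts[i]
-- (counts[i] with i a key of counts never raises; ported as getD i 0, exact here)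
def solution (test_lst : List Int) (n : Int) : Int :=
  let sortedL := PySem.List.sorted test_lst (fun x => x) false
  let counts := PySem.Dict.counter sortedL
  let st := counts.keys.foldl
    (fun (st : Int × Int) i =>
      let n' := st.2 - counts.getD i 0
      (st.1 + n' * counts.getD i 0, n')) (0, n)
  st.1

-- ===== PORT B =====
def solution_alt (test_lst : List Int) (n : Int) : Int :=
  let counts := test_lst.foldl (fun (d : PySem.Dict Int Int) x => d.insert x (d.getD x 0 + 1)) PySem.Dict.empty
  let total : Int := (test_lst.length : Int)
  let sq : Int := ((counts.values.map (fun c => c * c))).sum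
  n * total - PySem.Int.floordiv (total * total + sq) 2

-- ===== PRECONDITION & SPEC =====
def Spec_solution (test_lst : List Int) (n : Int) (out : Int) : Prop := out = solution_alt test_lst n
instance (test_lst : List Int) (n : Int) (out : Int) : Decidable (Spec_solution test_lst n out) := by unfold Spec_solution; infer_instance

-- ===== CLAIM (what is proved, stated in full; the proofs are below) =====
def Claim_equal_solution : Prop := ∀ (test_lst : List Int) (n : Int), Dom_solution test_lst n → Spec_solution test_lst n (solution test_lst n)

-- ===== LEMMAS AND PROOFS =====

-- g cs = sum of c_i * (c_1 + ... + c_i) over the list cs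
def pvG : List Int → Int
  | [] => 0
  | c :: cs => c * c + c * cs.sum + pvG cs

theorem pvG_two_mul (cs : List Int) :
    2 * pvG cs = cs.sum * cs.sum + (cs.map (fun c => c * c)).sum := by
  induction cs with
  | nil => simp [pvG]
  | cons c cs ih => simp [pvG, List.sum_cons]; ring_nf; ring_nf at ih; omega

-- A's loop, characterised: over a list of counts cs it computes a + m*sum - pvG cs
theorem pvLoop (cs : List Int) (a m : Int) :
    (cs.foldl (fun (st : Int × Int) c => (st.1 + (st.2 - c) * c, st.2 - c)) (a, m)).1
      = a + m * cs.sum - pvG cs := by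
  induction cs generalizing a m with
  | nil => simp [pvG]
  | cons c cs ih => simp only [List.foldl_cons, List.sum_cons, pvG, ih]; ring

-- VERDICT helper facts
theorem pv_keys_perm (L : List Int) :
    (PySem.Set.ofList (PySem.List.sorted L (fun x => x) false)).Perm (PySem.Set.ofList L) := by
  apply (List.perm_ext_iff_of_nodup (PySem.Set.nodup_ofList _) (PySem.Set.nodup_ofList _)).mpr
  intro a
  simp [PySem.Set.mem_ofList, PySem.List.mem_sorted]

theorem pv_sum_counts (L : List Int) :
    ((PySem.Set.ofList L).map (fun k => (L.count k : Int))).sum = (L.length : Int) := by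
  have hperm : (PySem.Set.ofList L).Perm L.dedup := by
    apply (List.perm_ext_iff_of_nodup (PySem.Set.nodup_ofList _) L.nodup_dedup).mpr
    intro a; simp [PySem.Set.mem_ofList]
  rw [(hperm.map (fun k => (L.count k : Int))).sum_eq]
  rw [show (fun k => ((L.count k : Nat) : Int)) = ((Nat.cast : Nat → Int) ∘ fun k => L.count k) from rfl,
     ← List.map_map, ← Nat.cast_list_sum, List.sum_map_count_dedup_eq_length]

-- ===== VERDICT (by name: the statement is the Claim_ definition above) =====
theorem solution_spec : Claim_equal_solution := by
  intro L n _
  unfold Spec_solution solution solution_alt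
  simp only [PySem.Dict.foldl_insert_getD_add_one_eq_counter,
    PySem.Dict.getD_counter, PySem.Dict.keys_counter,
    PySem.Dict.values_eq_map_keys _ (PySem.Dict.nodup_keys_counter _) 0]
  set sL := PySem.List.sorted L (fun x => x) false with hsL
  -- counts in the sorted list are counts in L
  have hcnt : ∀ k, (sL.count k : Int) = (L.count k : Int) := by
    intro k
    have h := (PySem.List.sorted_perm L (fun x => x) false).count_eq k
    rw [hsL]; exact_mod_cast h
  have hA : (PySem.Set.ofList sL).foldl
      (fun (st : Int × Int) i => (st.1 + (st.2 - (sL.count i : Int)) * (sL.count i : Int), st.2 - (sL.count i : Int))) (0, n)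
      = ((PySem.Set.ofList sL).map (fun k => (sL.count k : Int))).foldl
          (fun (st : Int × Int) c => (st.1 + (st.2 - c) * c, st.2 - c)) (0, n) := by
    rw [List.foldl_map]
  set csA := (PySem.Set.ofList sL).map (fun k => (sL.count k : Int)) with hcsA
  set csB := (PySem.Set.ofList L).map (fun k => (L.count k : Int)) with hcsB
  have hperm : csA.Perm csB := by
    have : csA = (PySem.Set.ofList sL).map (fun k => (L.count k : Int)) := by
      rw [hcsA]; exact List.map_congr_left (fun k _ => hcnt k)
    rw [this, hcsB]; exact (pv_keys_perm L).map _
  have hsum : csA.sum = (L.length : Int) := by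
    rw [hperm.sum_eq, hcsB, pv_sum_counts]
  have hsq : (csA.map (fun c => c * c)).sum = (csB.map (fun c => c * c)).sum :=
    (hperm.map (fun c => c * c)).sum_eq
  have hfd : PySem.Int.floordiv ((L.length : Int) * (L.length : Int) + (csB.map (fun c => c * c)).sum) 2 = pvG csA := by
    rw [← hsq, ← hsum, ← pvG_two_mul csA, PySem.Int.floordiv_eq_ediv_of_pos (by norm_num)]
    exact Int.mul_ediv_cancel_left _ (by norm_num)
  rw [hA, pvLoop, hsum, hfd]
  ring
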